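-- pv_equiv track=rewrite | github.com/jordanheckler-HMM/HYMetaLab | build_paper.py | insert_after_heading
-- ===== SOURCE A (Python) =====
-- def insert_after_heading(md_text, heading, img_markdown):
--     # Find heading line like "5. Results" or "6. Discussion & Interpretation"
--     lines = md_text.splitlines()
--     out = []
--     inserted = False
--     i = 0
--     while i < len(lines):
--         out.append(lines[i])
--         if not inserted and lines[i].strip().lower().startswith(heading.lower()):
--             # insert right after a blank line following the heading if present
--             out.append("")
--             out.append(img_markdown)
--             out.append("")
--             inserted = True
--         i += 1
--     if not inserted:
--         out.append("\n" + img_markdown + "\n")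
--     return "\n".join(out)
-- ===== SOURCE B (Python) =====
-- def insert_after_heading(md_text, heading, img_markdown):
--     lines = md_text.splitlines()
--     h = heading.lower()
--     idx = next((i for i, ln in enumerate(lines)
--                 if ln.strip().lower().startswith(h)), None)
--     if idx is None:
--         lines.append("\n" + img_markdown + "\n")
--     else:
--         lines[idx + 1:idx + 1] = ["", img_markdown, ""]
--     return "\n".join(lines)
-- ===== Notes on version B (the rewrite author's own statement) =====
-- stated objective: simpler
-- what changed: B locates the first matching heading line with a single find (next over enumerate) and splices the three-line image block in one slice assignment, instead of A's copy loop interleaving the insert with a flag.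
import Mathlib
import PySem

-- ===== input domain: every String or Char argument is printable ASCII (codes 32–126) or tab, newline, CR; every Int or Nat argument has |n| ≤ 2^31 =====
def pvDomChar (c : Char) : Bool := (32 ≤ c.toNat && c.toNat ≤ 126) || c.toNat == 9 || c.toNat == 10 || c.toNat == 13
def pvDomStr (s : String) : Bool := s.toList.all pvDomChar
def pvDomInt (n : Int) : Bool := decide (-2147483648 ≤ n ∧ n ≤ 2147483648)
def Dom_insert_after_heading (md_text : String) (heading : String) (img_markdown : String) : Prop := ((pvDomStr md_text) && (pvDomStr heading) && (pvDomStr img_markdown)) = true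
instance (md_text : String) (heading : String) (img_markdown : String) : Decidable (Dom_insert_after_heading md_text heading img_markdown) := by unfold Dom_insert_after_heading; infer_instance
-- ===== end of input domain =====

-- ===== PORT A =====
-- B changes only the decomposition (locate-then-splice instead of copy-loop-with-flag); same O(n) cost.
-- A's while loop: copy each line, and right after the first matching line append "", img, "".
def pvGoA (p : String → Bool) (img : String) : List String → Bool → List String × Bool
  | [], inserted => ([], inserted)
  | ln :: rest, inserted =>
    if !inserted && p ln then
      let r := pvGoA p img rest true
      (ln :: "" :: img :: "" :: r.1, r.2)
    else
      let r := pvGoA p img rest inserted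
      (ln :: r.1, r.2)

def insert_after_heading (md_text : String) (heading : String) (img_markdown : String) : String :=
  let lines := PySem.Str.splitlines md_text
  let p := fun ln => PySem.Str.startswith (PySem.Str.lower (PySem.Str.strip ln)) (PySem.Str.lower heading)
  let r := pvGoA p img_markdown lines false
  let out := if !r.2 then r.1 ++ ["\n" ++ img_markdown ++ "\n"] else r.1
  PySem.Str.join "\n" out

-- ===== PORT B =====
def insert_after_heading_alt (md_text : String) (heading : String) (img_markdown : String) : String :=
  let lines := PySem.Str.splitlines md_text
  let h := PySem.Str.lower heading
  match lines.findIdx? (fun ln => PySem.Str.startswith (PySem.Str.lower (PySem.Str.strip ln)) h) with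
  | none => PySem.Str.join "\n" (lines ++ ["\n" ++ img_markdown ++ "\n"])
  | some i => PySem.Str.join "\n" (lines.take (i + 1) ++ ["", img_markdown, ""] ++ lines.drop (i + 1))

-- ===== PRECONDITION & SPEC =====
def Spec_insert_after_heading (md_text : String) (heading : String) (img_markdown : String) (out : String) : Prop := out = insert_after_heading_alt md_text heading img_markdown
instance (md_text : String) (heading : String) (img_markdown : String) (out : String) : Decidable (Spec_insert_after_heading md_text heading img_markdown out) := by unfold Spec_insert_after_heading; infer_instance

-- ===== CLAIM (what is proved, stated in full; the proofs are below) =====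
def Claim_equal_insert_after_heading : Prop := ∀ (md_text : String) (heading : String) (img_markdown : String), Dom_insert_after_heading md_text heading img_markdown → Spec_insert_after_heading md_text heading img_markdown (insert_after_heading md_text heading img_markdown)

-- ===== LEMMAS AND PROOFS =====
theorem pvGoA_true (p : String → Bool) (img : String) (ls : List String) :
    pvGoA p img ls true = (ls, true) := by
  induction ls with
  | nil => rfl
  | cons a t ih => simp [pvGoA, ih]

theorem pvGoA_none (p : String → Bool) (img : String) (ls : List String)
    (h : ls.findIdx? p = none) : pvGoA p img ls false = (ls, false) := by
  induction ls with
  | nil => rfl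
  | cons a t ih =>
    rw [List.findIdx?_cons] at h
    by_cases hp : p a
    · rw [if_pos hp] at h; exact absurd h (by simp)
    · rw [if_neg hp, Option.map_eq_none_iff] at h
      simp [pvGoA, hp, ih h]

theorem pvGoA_some (p : String → Bool) (img : String) (ls : List String) (i : Nat)
    (h : ls.findIdx? p = some i) :
    pvGoA p img ls false = (ls.take (i + 1) ++ ["", img, ""] ++ ls.drop (i + 1), true) := by
  induction ls generalizing i with
  | nil => simp at h
  | cons a t ih =>
    rw [List.findIdx?_cons] at h
    by_cases hp : p a
    · rw [if_pos hp] at h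
      cases h
      simp [pvGoA, hp, pvGoA_true]
    · rw [if_neg hp, Option.map_eq_some_iff] at h
      obtain ⟨j, hj, rfl⟩ := h
      simp [pvGoA, hp, ih j hj]

-- ===== VERDICT (by name: the statement is the Claim_ definition above) =====
theorem insert_after_heading_spec : Claim_equal_insert_after_heading := by
  intro md heading img _
  unfold Spec_insert_after_heading insert_after_heading insert_after_heading_alt
  dsimp only
  cases h : (PySem.Str.splitlines md).findIdx?
      (fun ln => PySem.Str.startswith (PySem.Str.lower (PySem.Str.strip ln)) (PySem.Str.lower heading)) with
  | none => rw [pvGoA_none _ _ _ h]; simp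
  | some i => rw [pvGoA_some _ _ _ _ h]; simp
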